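-- pv_equiv track=rewrite | github.com/NoHaxUS/rochasistemas | bet_bola/utils/up_new.py | renaming_cotations
-- ===== SOURCE A (Python) =====
-- def renaming_cotations(string):
--
--     COTATION_NAME = {
--         "Under": "Abaixo",
--         "Over": "Acima",
--         "Draw": "Empate",
--         "Away": "Visitante",
--         "Home": "Casa",
--         "1st Half": "1° Tempo",
--         "2nd Half": "2° Tempo",
--         "No": "Não",
--         "Yes": "Sim",
--         "More": "Mais de",
--         "Odd": "Impar",
--         "Even" : "Par",
--         "more" : "Mais de"
--     }
--
--     for key_cotation in COTATION_NAME.keys():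
--         if key_cotation in string:
--             string = string.replace(key_cotation, COTATION_NAME[key_cotation])
--     return string
-- ===== SOURCE B (Python) =====
-- def renaming_cotations(string):
--     # Single left-to-right scan: at each position emit the translation of the
--     # first table key that matches there (skipping past it), otherwise the char.
--     TABLE = [
--         ("Under", "Abaixo"),
--         ("Over", "Acima"),
--         ("Draw", "Empate"),
--         ("Away", "Visitante"),
--         ("Home", "Casa"),
--         ("1st Half", "1° Tempo"),
--         ("2nd Half", "2° Tempo"),
--         ("No", "Não"),
--         ("Yes", "Sim"),
--         ("More", "Mais de"),
--         ("Odd", "Impar"),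
--         ("Even", "Par"),
--         ("more", "Mais de"),
--     ]
--     out = []
--     i = 0
--     n = len(string)
--     while i < n:
--         for key, value in TABLE:
--             if string.startswith(key, i):
--                 out.append(value)
--                 i += len(key)
--                 break
--         else:
--             out.append(string[i])
--             i += 1
--     return "".join(out)
-- ===== Notes on version B (the rewrite author's own statement) =====
-- stated objective: alternative
-- what changed: Replaces the 13 sequential full-string replace passes with one left-to-right scan that, at each position, emits the translation of the first matching key from the table (or the character itself), so each input character is examined once and no replacement value is ever re-scanned.
-- intended difference: On inputs containing the substring 'Yesore', A's cascaded passes first turn 'Yes' into 'Sim' and then re-match the produced 'Sim'+'ore' against the later key 'more', returning the garbled 'SiMais de'; B translates only terms present in the input and returns 'Simore', the intended translation. — e.g. on renaming_cotations("Yesore"): A returns "SiMais de", B returns "Simore"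
import Mathlib
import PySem

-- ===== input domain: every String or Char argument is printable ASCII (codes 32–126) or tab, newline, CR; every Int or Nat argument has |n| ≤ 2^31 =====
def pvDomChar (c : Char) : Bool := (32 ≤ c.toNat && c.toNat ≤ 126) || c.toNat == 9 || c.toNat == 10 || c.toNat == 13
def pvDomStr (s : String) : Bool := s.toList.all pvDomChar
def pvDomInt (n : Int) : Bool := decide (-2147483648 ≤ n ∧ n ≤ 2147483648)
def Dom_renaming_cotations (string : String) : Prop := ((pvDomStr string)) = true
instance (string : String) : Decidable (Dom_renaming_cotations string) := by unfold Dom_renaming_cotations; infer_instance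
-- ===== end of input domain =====

-- B replaces A's 13 sequential full-string replace passes by a single left-to-right table-driven
-- scan (objective: alternative); on inputs containing "Yesore" A's cascade double-translates and B
-- returns the intended direct translation (see D_ below).

-- ===== PORT A =====
def pvItems : List (String × String) :=
  [("Under", "Abaixo"), ("Over", "Acima"), ("Draw", "Empate"), ("Away", "Visitante"), ("Home", "Casa"), ("1st Half", "1° Tempo"), ("2nd Half", "2° Tempo"), ("No", "Não"), ("Yes", "Sim"), ("More", "Mais de"), ("Odd", "Impar"), ("Even", "Par"), ("more", "Mais de")]

def renaming_cotations (string : String) : String :=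
  ((PySem.Dict.mk pvItems).keys).foldl
    (fun s key_cotation =>
      if PySem.Str.isIn key_cotation s then
        PySem.Str.replace s key_cotation ((PySem.Dict.mk pvItems).getD key_cotation "")
      else s)
    string

-- ===== PORT B =====
def pvTable : List (List Char × List Char) :=
  [("Under".toList, "Abaixo".toList),
   ("Over".toList, "Acima".toList),
   ("Draw".toList, "Empate".toList),
   ("Away".toList, "Visitante".toList),
   ("Home".toList, "Casa".toList),
   ("1st Half".toList, "1° Tempo".toList),
   ("2nd Half".toList, "2° Tempo".toList),
   ("No".toList, "Não".toList),
   ("Yes".toList, "Sim".toList),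
   ("More".toList, "Mais de".toList),
   ("Odd".toList, "Impar".toList),
   ("Even".toList, "Par".toList),
   ("more".toList, "Mais de".toList)]

-- the inner `for key, value in TABLE: if string.startswith(key, i): … break / else:` loop
def pvFindKey : List (List Char × List Char) → List Char → Option (List Char × List Char)
  | [], _ => none
  | kv :: rest, s => if PySem.Chars.startswith s kv.1 then some kv else pvFindKey rest s

-- the outer `while i < n` loop over the remaining suffix; fuel = n bounds the iteration count
def pvScanGo : Nat → List Char → List Char
  | 0, _ => []
  | fuel + 1, s =>
    match pvFindKey pvTable s with
    | some kv => kv.2 ++ pvScanGo fuel (s.drop kv.1.length)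
    | none =>
      match s with
      | [] => []
      | c :: t => c :: pvScanGo fuel t

def renaming_cotations_alt (string : String) : String :=
  String.ofList (pvScanGo string.toList.length string.toList)

-- ===== PRECONDITION & SPEC =====
-- On inputs containing the substring "Yesore", A's cascaded passes first turn "Yes" into "Sim" and
-- then re-match the produced "Sim"+"ore" against the later key "more", returning the garbled
-- "SiMais de"; B translates only terms present in the input and returns "Simore", the intended
-- translation.
def D_renaming_cotations (string : String) : Prop := PySem.Str.isIn "Yesore" string = true
instance (string : String) : Decidable (D_renaming_cotations string) := by
  unfold D_renaming_cotations; infer_instance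

def Spec_renaming_cotations (string : String) (out : String) : Prop :=
  ¬ D_renaming_cotations string → out = renaming_cotations_alt string
instance (string : String) (out : String) : Decidable (Spec_renaming_cotations string out) := by
  unfold Spec_renaming_cotations; infer_instance

def pvDiffWitness_renaming_cotations : String := "Yesore"
def pvDiffWitnessOut_renaming_cotations : String × String := ("SiMais de", "Simore")

-- ===== CLAIM (what is proved, stated in full; the proofs are below) =====
def Claim_unchanged_renaming_cotations : Prop := ∀ (string : String), Dom_renaming_cotations string → Spec_renaming_cotations string (renaming_cotations string)
def Claim_changed_renaming_cotations : Prop := Dom_renaming_cotations (pvDiffWitness_renaming_cotations) ∧ D_renaming_cotations (pvDiffWitness_renaming_cotations) ∧ renaming_cotations (pvDiffWitness_renaming_cotations) = pvDiffWitnessOut_renaming_cotations.1 ∧ renaming_cotations_alt (pvDiffWitness_renaming_cotations) = pvDiffWitnessOut_renaming_cotations.2 ∧ pvDiffWitnessOut_renaming_cotations.1 ≠ pvDiffWitnessOut_renaming_cotations.2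
def Claim_exact_renaming_cotations : Prop := ∀ (string : String), Dom_renaming_cotations string → D_renaming_cotations string → renaming_cotations string ≠ renaming_cotations_alt string

-- ===== LEMMAS AND PROOFS =====

-- chars occurring in the tail (all but the first char) of some table key
def pvTC : List Char := [' ', 'H', 'a', 'd', 'e', 'f', 'l', 'm', 'n', 'o', 'r', 's', 't', 'v', 'w', 'y']

-- the chained-replace semantics A iterates: fold replace over the table
def pvFoldA (L : List (List Char × List Char)) (s : List Char) : List Char :=
  L.foldl (fun acc kv => PySem.Chars.replace acc kv.1 kv.2) s

theorem pv_foldA_nil (s : List Char) : pvFoldA [] s = s := rfl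

theorem pv_foldA_cons (kv : List Char × List Char) (L : List (List Char × List Char)) (s : List Char) :
    pvFoldA (kv :: L) s = pvFoldA L (PySem.Chars.replace s kv.1 kv.2) := rfl

theorem pv_foldA_append (L1 L2 : List (List Char × List Char)) (s : List Char) :
    pvFoldA (L1 ++ L2) s = pvFoldA L2 (pvFoldA L1 s) := by
  simp [pvFoldA]

theorem pv_go_acc (old new : List Char) (fuel : Nat) : ∀ (l acc : List Char),
    PySem.Chars.replace.go old new fuel l acc = acc.reverse ++ PySem.Chars.replace.go old new fuel l [] := by
  induction fuel with
  | zero => intro l acc; simp [PySem.Chars.replace.go]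
  | succ f ih =>
    intro l acc
    cases l with
    | nil => simp [PySem.Chars.replace.go]
    | cons c t =>
      simp only [PySem.Chars.replace.go]
      split
      · rw [ih (List.drop old.length (c :: t)) (new.reverse ++ acc),
          ih (List.drop old.length (c :: t)) (new.reverse ++ [])]
        simp
      · rw [ih t (c :: acc), ih t [c]]
        simp

theorem pv_go_fuel (old new : List Char) (hold : old ≠ []) :
    ∀ (n fuel fuel' : Nat) (l : List Char), l.length ≤ fuel → l.length ≤ fuel' → l.length ≤ n →
      PySem.Chars.replace.go old new fuel l [] = PySem.Chars.replace.go old new fuel' l [] := by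
  intro n
  induction n with
  | zero =>
    intro fuel fuel' l _ _ h3
    have hl : l = [] := by cases l with | nil => rfl | cons c t => simp at h3
    subst hl
    cases fuel <;> cases fuel' <;> simp [PySem.Chars.replace.go]
  | succ n ih =>
    intro fuel fuel' l h1 h2 h3
    cases l with
    | nil => cases fuel <;> cases fuel' <;> simp [PySem.Chars.replace.go]
    | cons c t =>
      obtain ⟨f, rfl⟩ : ∃ f, fuel = f + 1 := ⟨fuel - 1, by simp at h1; omega⟩
      obtain ⟨f', rfl⟩ : ∃ f', fuel' = f' + 1 := ⟨fuel' - 1, by simp at h2; omega⟩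
      have hop : 1 ≤ old.length := by cases old with | nil => exact absurd rfl hold | cons a b => simp
      simp only [PySem.Chars.replace.go]
      simp only [List.length_cons] at h1 h2 h3
      by_cases hp : old.isPrefixOf (c :: t) = true
      · rw [if_pos hp, if_pos hp, pv_go_acc old new f, pv_go_acc old new f']
        have hd : (List.drop old.length (c :: t)).length = t.length + 1 - old.length := by
          simp
        congr 1
        apply ih <;> (rw [hd]; omega)
      · rw [if_neg hp, if_neg hp, pv_go_acc old new f, pv_go_acc old new f']
        congr 1
        apply ih <;> omega

theorem pv_replace_def (old new s : List Char) (hold : old ≠ []) :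
    PySem.Chars.replace s old new = PySem.Chars.replace.go old new s.length s [] := by
  rw [PySem.Chars.replace, if_neg (by simp [hold])]

theorem pv_replace_nil (old new : List Char) (hold : old ≠ []) :
    PySem.Chars.replace [] old new = [] := by
  rw [pv_replace_def _ _ _ hold]
  rfl

theorem pv_replace_cons (old new : List Char) (c : Char) (t : List Char) (hold : old ≠ [])
    (h : ¬ old <+: (c :: t)) :
    PySem.Chars.replace (c :: t) old new = c :: PySem.Chars.replace t old new := by
  rw [pv_replace_def _ _ _ hold, pv_replace_def _ _ _ hold]
  have hb : old.isPrefixOf (c :: t) = false := by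
    rw [Bool.eq_false_iff]
    intro hc
    exact h (List.isPrefixOf_iff_prefix.mp hc)
  simp only [List.length_cons, PySem.Chars.replace.go, hb, Bool.false_eq_true, if_false]
  rw [pv_go_acc]
  simp

theorem pv_replace_front (old new s : List Char) (hold : old ≠ []) (h : old <+: s) :
    PySem.Chars.replace s old new = new ++ PySem.Chars.replace (s.drop old.length) old new := by
  obtain ⟨c, t, rfl⟩ : ∃ c t, s = c :: t := by
    cases s with
    | nil => exact absurd (List.prefix_nil.mp h) hold
    | cons c t => exact ⟨c, t, rfl⟩
  rw [pv_replace_def _ _ _ hold, pv_replace_def _ _ _ hold]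
  have hop : 1 ≤ old.length := by cases old with | nil => exact absurd rfl hold | cons a b => simp
  have hb : old.isPrefixOf (c :: t) = true := List.isPrefixOf_iff_prefix.mpr h
  simp only [List.length_cons, PySem.Chars.replace.go, hb, if_true]
  have hop : 1 ≤ old.length := by
    cases old with
    | nil => exact absurd rfl hold
    | cons a b => simp
  have hd : (List.drop old.length (c :: t)).length = t.length + 1 - old.length := by
    simp
  rw [pv_go_acc old new t.length (List.drop old.length (c :: t)) (new.reverse ++ [])]
  simp only [List.append_nil, List.reverse_reverse]
  congr 1
  apply pv_go_fuel old new hold t.length t.length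
  · rw [hd]; omega
  · exact le_rfl
  · rw [hd]; omega

theorem pv_not_prefix_append (a u t : List Char) (h1 : ¬ a <+: u) (h2 : ¬ u <+: a) :
    ¬ a <+: (u ++ t) := by
  intro hp
  rcases Nat.le_total a.length u.length with hle | hle
  · exact h1 (List.prefix_of_prefix_length_le hp (List.prefix_append u t) hle)
  · exact h2 (List.prefix_of_prefix_length_le (List.prefix_append u t) hp hle)

theorem pv_replace_eq_self (old new : List Char) (hold : old ≠ []) :
    ∀ s : List Char, (∀ j, ¬ old <+: s.drop j) → PySem.Chars.replace s old new = s := by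
  intro s
  induction s with
  | nil => intro _; exact pv_replace_nil _ _ hold
  | cons c t ih =>
    intro h
    rw [pv_replace_cons _ _ _ _ hold (h 0), ih (fun j => h (j + 1))]

theorem pv_frontw (old rep : List Char) (hold : old ≠ []) (hrep : rep ≠ []) :
    ∀ (n : Nat) (s w : List Char), s.length ≤ n → (∀ c ∈ w, rep.head? ≠ some c) →
      w <+: PySem.Chars.replace s old rep → w <+: s := by
  intro n
  induction n with
  | zero =>
    intro s w h1 _ h3
    have hs : s = [] := by cases s with | nil => rfl | cons c t => simp at h1
    subst hs
    rw [pv_replace_nil _ _ hold] at h3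
    rw [List.prefix_nil.mp h3]
  | succ n ih =>
    intro s w h1 hw hpf
    by_cases hp : old <+: s
    · rw [pv_replace_front _ _ _ hold hp] at hpf
      cases w with
      | nil => exact List.nil_prefix
      | cons d w' =>
        obtain ⟨r, rtl, rfl⟩ : ∃ r rtl, rep = r :: rtl := by
          cases rep with
          | nil => exact absurd rfl hrep
          | cons r rtl => exact ⟨r, rtl, rfl⟩
        rw [List.cons_append] at hpf
        exact absurd ((List.cons_prefix_cons.mp hpf).1)
          (fun hdr => (hw d (List.mem_cons_self)) (by rw [hdr]; rfl))
    · cases s with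
      | nil =>
        rw [pv_replace_nil _ _ hold] at hpf
        rw [List.prefix_nil.mp hpf]
      | cons c t =>
        rw [pv_replace_cons _ _ _ _ hold hp] at hpf
        cases w with
        | nil => exact List.nil_prefix
        | cons d w' =>
          obtain ⟨hdc, hw'⟩ := List.cons_prefix_cons.mp hpf
          subst hdc
          exact List.cons_prefix_cons.mpr
            ⟨rfl, ih t w' (by simp at h1; omega) (fun e he => hw e (List.mem_cons_of_mem _ he)) hw'⟩

theorem pv_shield (old new : List Char) (hold : old ≠ []) :
    ∀ (u t : List Char), (∀ i, i < u.length → ¬ old <+: u.drop i ∧ ¬ u.drop i <+: old) →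
      PySem.Chars.replace (u ++ t) old new = u ++ PySem.Chars.replace t old new := by
  intro u
  induction u with
  | nil => intro t _; simp
  | cons c u' ih =>
    intro t h
    have h0 := h 0 (by simp)
    rw [List.cons_append,
      pv_replace_cons _ _ _ _ hold
        (by rw [← List.cons_append]; exact pv_not_prefix_append _ _ _ h0.1 h0.2),
      ih t (fun i hi => h (i + 1) (by simp; omega))]
    rfl

theorem pv_foldA_empty (L : List (List Char × List Char)) (h : ∀ kv ∈ L, kv.1 ≠ []) :
    pvFoldA L [] = [] := by
  induction L with
  | nil => rfl
  | cons kv L' ih =>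
    rw [pv_foldA_cons, pv_replace_nil _ _ (h kv (List.mem_cons_self)),
      ih (fun kv' hm => h kv' (List.mem_cons_of_mem _ hm))]

theorem pv_shield_fold (L : List (List Char × List Char)) (u : List Char)
    (h : ∀ kv ∈ L, kv.1 ≠ [] ∧ ∀ i, i < u.length → ¬ kv.1 <+: u.drop i ∧ ¬ u.drop i <+: kv.1) :
    ∀ t, pvFoldA L (u ++ t) = u ++ pvFoldA L t := by
  induction L with
  | nil => intro t; rfl
  | cons kv L' ih =>
    intro t
    have hh := h kv (List.mem_cons_self)
    rw [pv_foldA_cons, pv_shield _ _ hh.1 u t hh.2, pv_foldA_cons]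
    exact ih (fun kv' hm => h kv' (List.mem_cons_of_mem _ hm)) _

theorem pv_frontw_fold (w : List Char) (L : List (List Char × List Char))
    (hW : ∀ c ∈ w, c ∈ pvTC)
    (h : ∀ kv ∈ L, kv.1 ≠ [] ∧ kv.2 ≠ [] ∧ (∀ e ∈ kv.1.tail, e ∈ pvTC) ∧ (∀ e ∈ kv.2.take 1, e ∉ pvTC)) :
    ∀ t, w <+: pvFoldA L t → w <+: t := by
  induction L with
  | nil => intro t hpf; exact hpf
  | cons kv L' ih =>
    intro t hpf
    rw [pv_foldA_cons] at hpf
    have hh := h kv (List.mem_cons_self)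
    have h2 : w <+: PySem.Chars.replace t kv.1 kv.2 :=
      ih (fun kv' hm => h kv' (List.mem_cons_of_mem _ hm)) _ hpf
    apply pv_frontw kv.1 kv.2 hh.1 hh.2.1 t.length t w le_rfl _ h2
    intro c hc heq
    obtain ⟨r, rtl, hr⟩ : ∃ r rtl, kv.2 = r :: rtl := by
      cases hx : kv.2 with
      | nil => exact absurd hx hh.2.1
      | cons r rtl => exact ⟨r, rtl, rfl⟩
    rw [hr] at heq
    have hrc : r = c := by simpa using heq
    exact hh.2.2.2 r (by rw [hr]; simp) (by rw [hrc]; exact hW c hc)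

theorem pv_cons_fold (c : Char) :
    ∀ (L : List (List Char × List Char)),
      (∀ kv ∈ L, kv.1 ≠ [] ∧ kv.2 ≠ [] ∧ (∀ e ∈ kv.1.tail, e ∈ pvTC) ∧ (∀ e ∈ kv.2.take 1, e ∉ pvTC)) →
      ∀ t, (∀ kv ∈ L, ¬ kv.1 <+: (c :: t)) →
      pvFoldA L (c :: t) = c :: pvFoldA L t := by
  intro L
  induction L with
  | nil => intro _ t _; rfl
  | cons kv L' ih =>
    intro h1 t h2
    have hh := h1 kv (List.mem_cons_self)
    rw [pv_foldA_cons, pv_replace_cons _ _ _ _ hh.1 (h2 kv (List.mem_cons_self)), pv_foldA_cons]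
    apply ih (fun kv' hm => h1 kv' (List.mem_cons_of_mem _ hm))
    intro kv' hm' hpf
    have hh' := h1 kv' (List.mem_cons_of_mem _ hm')
    obtain ⟨d, ktl, hkv'⟩ : ∃ d ktl, kv'.1 = d :: ktl := by
      cases hx : kv'.1 with
      | nil => exact absurd hx hh'.1
      | cons d ktl => exact ⟨d, ktl, rfl⟩
    rw [hkv'] at hpf
    obtain ⟨hdc, htl⟩ := List.cons_prefix_cons.mp hpf
    have htt : ktl <+: t := by
      apply pv_frontw kv.1 kv.2 hh.1 hh.2.1 t.length t ktl le_rfl _ htl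
      intro e he heq
      obtain ⟨r, rtl, hr⟩ : ∃ r rtl, kv.2 = r :: rtl := by
        cases hx : kv.2 with
        | nil => exact absurd hx hh.2.1
        | cons r rtl => exact ⟨r, rtl, rfl⟩
      rw [hr] at heq
      have hre : r = e := by simpa using heq
      have heTC : e ∈ pvTC := hh'.2.2.1 e (by rw [hkv']; exact he)
      exact hh.2.2.2 r (by rw [hr]; simp) (by rw [hre]; exact heTC)
    exact h2 kv' (List.mem_cons_of_mem _ hm') (by rw [hkv']; exact List.cons_prefix_cons.mpr ⟨hdc, htt⟩)

set_option maxRecDepth 4096 in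
theorem pv_tableKeysNe : ∀ x ∈ pvTable, x.1 ≠ ([] : List Char) := by
  intro x hm
  simp only [pvTable, List.mem_cons, List.not_mem_nil, or_false] at hm
  rcases hm with rfl|rfl|rfl|rfl|rfl|rfl|rfl|rfl|rfl|rfl|rfl|rfl|rfl <;> decide

set_option maxRecDepth 4096 in
theorem pv_goodTable : ∀ kv ∈ pvTable,
    kv.1 ≠ ([] : List Char) ∧ kv.2 ≠ ([] : List Char) ∧
      (∀ e ∈ kv.1.tail, e ∈ pvTC) ∧ (∀ e ∈ kv.2.take 1, e ∉ pvTC) := by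
  intro kv hm
  simp only [pvTable, List.mem_cons, List.not_mem_nil, or_false] at hm
  rcases hm with rfl|rfl|rfl|rfl|rfl|rfl|rfl|rfl|rfl|rfl|rfl|rfl|rfl <;> exact ⟨by decide, by decide, by simp [pvTC], by simp [pvTC]⟩

set_option maxRecDepth 4096 in
theorem pv_goodPRE : ∀ kv ∈ ([("Under".toList, "Abaixo".toList), ("Over".toList, "Acima".toList), ("Draw".toList, "Empate".toList), ("Away".toList, "Visitante".toList), ("Home".toList, "Casa".toList), ("1st Half".toList, "1° Tempo".toList), ("2nd Half".toList, "2° Tempo".toList), ("No".toList, "Não".toList)] : List (List Char × List Char)),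
    kv.1 ≠ ([] : List Char) ∧ kv.2 ≠ ([] : List Char) ∧
      (∀ e ∈ kv.1.tail, e ∈ pvTC) ∧ (∀ e ∈ kv.2.take 1, e ∉ pvTC) := by
  intro kv hm
  simp only [List.mem_cons, List.not_mem_nil, or_false] at hm
  rcases hm with rfl|rfl|rfl|rfl|rfl|rfl|rfl|rfl <;> exact ⟨by decide, by decide, by simp [pvTC], by simp [pvTC]⟩

set_option maxRecDepth 4096 in
theorem pv_goodMOE : ∀ kv ∈ ([("More".toList, "Mais de".toList), ("Odd".toList, "Impar".toList), ("Even".toList, "Par".toList)] : List (List Char × List Char)),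
    kv.1 ≠ ([] : List Char) ∧ kv.2 ≠ ([] : List Char) ∧
      (∀ e ∈ kv.1.tail, e ∈ pvTC) ∧ (∀ e ∈ kv.2.take 1, e ∉ pvTC) := by
  intro kv hm
  simp only [List.mem_cons, List.not_mem_nil, or_false] at hm
  rcases hm with rfl|rfl|rfl <;> exact ⟨by decide, by decide, by simp [pvTC], by simp [pvTC]⟩

theorem pv_keystep (L1 L2 : List (List Char × List Char)) (k v : List Char) (t : List Char)
    (hk : k ≠ [])
    (hL1 : ∀ kv ∈ L1, kv.1 ≠ [] ∧ ∀ i, i < k.length → ¬ kv.1 <+: k.drop i ∧ ¬ k.drop i <+: kv.1)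
    (hL2 : ∀ kv ∈ L2, kv.1 ≠ [] ∧ ∀ i, i < v.length → ¬ kv.1 <+: v.drop i ∧ ¬ v.drop i <+: kv.1) :
    pvFoldA (L1 ++ (k, v) :: L2) (k ++ t) = v ++ pvFoldA (L1 ++ (k, v) :: L2) t := by
  rw [pv_foldA_append, pv_foldA_append, pv_foldA_cons, pv_foldA_cons,
    pv_shield_fold L1 k hL1 t,
    pv_replace_front _ _ _ hk (List.prefix_append _ _), List.drop_left,
    pv_shield_fold L2 v hL2 _]

theorem pv_keystep_Under (t : List Char) :
    pvFoldA pvTable ("Under".toList ++ t) = "Abaixo".toList ++ pvFoldA pvTable t := by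
  rw [show pvTable = ([] : List (List Char × List Char)) ++ ("Under".toList, "Abaixo".toList) :: [("Over".toList, "Acima".toList), ("Draw".toList, "Empate".toList), ("Away".toList, "Visitante".toList), ("Home".toList, "Casa".toList), ("1st Half".toList, "1° Tempo".toList), ("2nd Half".toList, "2° Tempo".toList), ("No".toList, "Não".toList), ("Yes".toList, "Sim".toList), ("More".toList, "Mais de".toList), ("Odd".toList, "Impar".toList), ("Even".toList, "Par".toList), ("more".toList, "Mais de".toList)] from rfl]
  exact pv_keystep _ _ _ _ t (by decide) (by decide) (by decide)

theorem pv_keystep_Over (t : List Char) :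
    pvFoldA pvTable ("Over".toList ++ t) = "Acima".toList ++ pvFoldA pvTable t := by
  rw [show pvTable = ([("Under".toList, "Abaixo".toList)] : List (List Char × List Char)) ++ ("Over".toList, "Acima".toList) :: [("Draw".toList, "Empate".toList), ("Away".toList, "Visitante".toList), ("Home".toList, "Casa".toList), ("1st Half".toList, "1° Tempo".toList), ("2nd Half".toList, "2° Tempo".toList), ("No".toList, "Não".toList), ("Yes".toList, "Sim".toList), ("More".toList, "Mais de".toList), ("Odd".toList, "Impar".toList), ("Even".toList, "Par".toList), ("more".toList, "Mais de".toList)] from rfl]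
  exact pv_keystep _ _ _ _ t (by decide) (by decide) (by decide)

theorem pv_keystep_Draw (t : List Char) :
    pvFoldA pvTable ("Draw".toList ++ t) = "Empate".toList ++ pvFoldA pvTable t := by
  rw [show pvTable = ([("Under".toList, "Abaixo".toList), ("Over".toList, "Acima".toList)] : List (List Char × List Char)) ++ ("Draw".toList, "Empate".toList) :: [("Away".toList, "Visitante".toList), ("Home".toList, "Casa".toList), ("1st Half".toList, "1° Tempo".toList), ("2nd Half".toList, "2° Tempo".toList), ("No".toList, "Não".toList), ("Yes".toList, "Sim".toList), ("More".toList, "Mais de".toList), ("Odd".toList, "Impar".toList), ("Even".toList, "Par".toList), ("more".toList, "Mais de".toList)] from rfl]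
  exact pv_keystep _ _ _ _ t (by decide) (by decide) (by decide)

theorem pv_keystep_Away (t : List Char) :
    pvFoldA pvTable ("Away".toList ++ t) = "Visitante".toList ++ pvFoldA pvTable t := by
  rw [show pvTable = ([("Under".toList, "Abaixo".toList), ("Over".toList, "Acima".toList), ("Draw".toList, "Empate".toList)] : List (List Char × List Char)) ++ ("Away".toList, "Visitante".toList) :: [("Home".toList, "Casa".toList), ("1st Half".toList, "1° Tempo".toList), ("2nd Half".toList, "2° Tempo".toList), ("No".toList, "Não".toList), ("Yes".toList, "Sim".toList), ("More".toList, "Mais de".toList), ("Odd".toList, "Impar".toList), ("Even".toList, "Par".toList), ("more".toList, "Mais de".toList)] from rfl]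
  exact pv_keystep _ _ _ _ t (by decide) (by decide) (by decide)

theorem pv_keystep_Home (t : List Char) :
    pvFoldA pvTable ("Home".toList ++ t) = "Casa".toList ++ pvFoldA pvTable t := by
  rw [show pvTable = ([("Under".toList, "Abaixo".toList), ("Over".toList, "Acima".toList), ("Draw".toList, "Empate".toList), ("Away".toList, "Visitante".toList)] : List (List Char × List Char)) ++ ("Home".toList, "Casa".toList) :: [("1st Half".toList, "1° Tempo".toList), ("2nd Half".toList, "2° Tempo".toList), ("No".toList, "Não".toList), ("Yes".toList, "Sim".toList), ("More".toList, "Mais de".toList), ("Odd".toList, "Impar".toList), ("Even".toList, "Par".toList), ("more".toList, "Mais de".toList)] from rfl]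
  exact pv_keystep _ _ _ _ t (by decide) (by decide) (by decide)

theorem pv_keystep_FirstHalf (t : List Char) :
    pvFoldA pvTable ("1st Half".toList ++ t) = "1° Tempo".toList ++ pvFoldA pvTable t := by
  rw [show pvTable = ([("Under".toList, "Abaixo".toList), ("Over".toList, "Acima".toList), ("Draw".toList, "Empate".toList), ("Away".toList, "Visitante".toList), ("Home".toList, "Casa".toList)] : List (List Char × List Char)) ++ ("1st Half".toList, "1° Tempo".toList) :: [("2nd Half".toList, "2° Tempo".toList), ("No".toList, "Não".toList), ("Yes".toList, "Sim".toList), ("More".toList, "Mais de".toList), ("Odd".toList, "Impar".toList), ("Even".toList, "Par".toList), ("more".toList, "Mais de".toList)] from rfl]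
  exact pv_keystep _ _ _ _ t (by decide) (by decide) (by decide)

theorem pv_keystep_SecondHalf (t : List Char) :
    pvFoldA pvTable ("2nd Half".toList ++ t) = "2° Tempo".toList ++ pvFoldA pvTable t := by
  rw [show pvTable = ([("Under".toList, "Abaixo".toList), ("Over".toList, "Acima".toList), ("Draw".toList, "Empate".toList), ("Away".toList, "Visitante".toList), ("Home".toList, "Casa".toList), ("1st Half".toList, "1° Tempo".toList)] : List (List Char × List Char)) ++ ("2nd Half".toList, "2° Tempo".toList) :: [("No".toList, "Não".toList), ("Yes".toList, "Sim".toList), ("More".toList, "Mais de".toList), ("Odd".toList, "Impar".toList), ("Even".toList, "Par".toList), ("more".toList, "Mais de".toList)] from rfl]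
  exact pv_keystep _ _ _ _ t (by decide) (by decide) (by decide)

theorem pv_keystep_No (t : List Char) :
    pvFoldA pvTable ("No".toList ++ t) = "Não".toList ++ pvFoldA pvTable t := by
  rw [show pvTable = ([("Under".toList, "Abaixo".toList), ("Over".toList, "Acima".toList), ("Draw".toList, "Empate".toList), ("Away".toList, "Visitante".toList), ("Home".toList, "Casa".toList), ("1st Half".toList, "1° Tempo".toList), ("2nd Half".toList, "2° Tempo".toList)] : List (List Char × List Char)) ++ ("No".toList, "Não".toList) :: [("Yes".toList, "Sim".toList), ("More".toList, "Mais de".toList), ("Odd".toList, "Impar".toList), ("Even".toList, "Par".toList), ("more".toList, "Mais de".toList)] from rfl]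
  exact pv_keystep _ _ _ _ t (by decide) (by decide) (by decide)

theorem pv_keystep_More (t : List Char) :
    pvFoldA pvTable ("More".toList ++ t) = "Mais de".toList ++ pvFoldA pvTable t := by
  rw [show pvTable = ([("Under".toList, "Abaixo".toList), ("Over".toList, "Acima".toList), ("Draw".toList, "Empate".toList), ("Away".toList, "Visitante".toList), ("Home".toList, "Casa".toList), ("1st Half".toList, "1° Tempo".toList), ("2nd Half".toList, "2° Tempo".toList), ("No".toList, "Não".toList), ("Yes".toList, "Sim".toList)] : List (List Char × List Char)) ++ ("More".toList, "Mais de".toList) :: [("Odd".toList, "Impar".toList), ("Even".toList, "Par".toList), ("more".toList, "Mais de".toList)] from rfl]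
  exact pv_keystep _ _ _ _ t (by decide) (by decide) (by decide)

theorem pv_keystep_Odd (t : List Char) :
    pvFoldA pvTable ("Odd".toList ++ t) = "Impar".toList ++ pvFoldA pvTable t := by
  rw [show pvTable = ([("Under".toList, "Abaixo".toList), ("Over".toList, "Acima".toList), ("Draw".toList, "Empate".toList), ("Away".toList, "Visitante".toList), ("Home".toList, "Casa".toList), ("1st Half".toList, "1° Tempo".toList), ("2nd Half".toList, "2° Tempo".toList), ("No".toList, "Não".toList), ("Yes".toList, "Sim".toList), ("More".toList, "Mais de".toList)] : List (List Char × List Char)) ++ ("Odd".toList, "Impar".toList) :: [("Even".toList, "Par".toList), ("more".toList, "Mais de".toList)] from rfl]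
  exact pv_keystep _ _ _ _ t (by decide) (by decide) (by decide)

theorem pv_keystep_Even (t : List Char) :
    pvFoldA pvTable ("Even".toList ++ t) = "Par".toList ++ pvFoldA pvTable t := by
  rw [show pvTable = ([("Under".toList, "Abaixo".toList), ("Over".toList, "Acima".toList), ("Draw".toList, "Empate".toList), ("Away".toList, "Visitante".toList), ("Home".toList, "Casa".toList), ("1st Half".toList, "1° Tempo".toList), ("2nd Half".toList, "2° Tempo".toList), ("No".toList, "Não".toList), ("Yes".toList, "Sim".toList), ("More".toList, "Mais de".toList), ("Odd".toList, "Impar".toList)] : List (List Char × List Char)) ++ ("Even".toList, "Par".toList) :: [("more".toList, "Mais de".toList)] from rfl]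
  exact pv_keystep _ _ _ _ t (by decide) (by decide) (by decide)

theorem pv_keystep_lowmore (t : List Char) :
    pvFoldA pvTable ("more".toList ++ t) = "Mais de".toList ++ pvFoldA pvTable t := by
  rw [show pvTable = ([("Under".toList, "Abaixo".toList), ("Over".toList, "Acima".toList), ("Draw".toList, "Empate".toList), ("Away".toList, "Visitante".toList), ("Home".toList, "Casa".toList), ("1st Half".toList, "1° Tempo".toList), ("2nd Half".toList, "2° Tempo".toList), ("No".toList, "Não".toList), ("Yes".toList, "Sim".toList), ("More".toList, "Mais de".toList), ("Odd".toList, "Impar".toList), ("Even".toList, "Par".toList)] : List (List Char × List Char)) ++ ("more".toList, "Mais de".toList) :: [] from rfl]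
  exact pv_keystep _ _ _ _ t (by decide) (by decide) (by decide)


theorem pv_more_step (Y : List Char) (hY : ¬ (('o'::'r'::'e'::[]) <+: Y)) :
    PySem.Chars.replace ("Sim".toList ++ Y) "more".toList "Mais de".toList
      = "Sim".toList ++ PySem.Chars.replace Y "more".toList "Mais de".toList := by
  have h1 : ("Sim".toList ++ Y) = 'S'::'i'::'m'::Y := rfl
  rw [h1,
    pv_replace_cons _ _ _ _ (by decide)
      (by intro hp; exact absurd (List.cons_prefix_cons.mp hp).1 (by decide)),
    pv_replace_cons _ _ _ _ (by decide)
      (by intro hp; exact absurd (List.cons_prefix_cons.mp hp).1 (by decide)),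
    pv_replace_cons _ _ _ _ (by decide)
      (by intro hp; exact hY (List.cons_prefix_cons.mp hp).2)]
  rfl

theorem pv_oreTC : ∀ c ∈ ('o'::'r'::'e'::[] : List Char), c ∈ pvTC := by
  simp [pvTC]

theorem pv_yesNe : ("Yes".toList : List Char) ≠ [] := by decide

theorem pv_simNe : ("Sim".toList : List Char) ≠ [] := by decide

set_option maxRecDepth 4096 in
theorem pv_simHead : ∀ c ∈ ('o'::'r'::'e'::[] : List Char), ("Sim".toList : List Char).head? ≠ some c := by
  intro c hc
  simp only [List.mem_cons, List.not_mem_nil, or_false] at hc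
  rcases hc with rfl | rfl | rfl <;> decide

set_option maxRecDepth 4096 in
theorem pv_keystep_Yes (t : List Char) (hore : ¬ (('o'::'r'::'e'::[]) <+: t)) :
    pvFoldA pvTable ("Yes".toList ++ t) = "Sim".toList ++ pvFoldA pvTable t := by
  have hY : ¬ (('o'::'r'::'e'::[]) <+:
      pvFoldA ([("More".toList, "Mais de".toList), ("Odd".toList, "Impar".toList), ("Even".toList, "Par".toList)] : List (List Char × List Char))
        (PySem.Chars.replace (pvFoldA ([("Under".toList, "Abaixo".toList), ("Over".toList, "Acima".toList), ("Draw".toList, "Empate".toList), ("Away".toList, "Visitante".toList), ("Home".toList, "Casa".toList), ("1st Half".toList, "1° Tempo".toList), ("2nd Half".toList, "2° Tempo".toList), ("No".toList, "Não".toList)] : List (List Char × List Char)) t)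
          "Yes".toList "Sim".toList)) := by
    intro hp
    have h2 := pv_frontw_fold ('o'::'r'::'e'::[]) _ pv_oreTC pv_goodMOE _ hp
    have h3 := pv_frontw "Yes".toList "Sim".toList pv_yesNe pv_simNe _ _ ('o'::'r'::'e'::[])
      le_rfl pv_simHead h2
    exact hore (pv_frontw_fold ('o'::'r'::'e'::[]) _ pv_oreTC pv_goodPRE _ h3)
  rw [show pvTable =
      ([("Under".toList, "Abaixo".toList), ("Over".toList, "Acima".toList), ("Draw".toList, "Empate".toList), ("Away".toList, "Visitante".toList), ("Home".toList, "Casa".toList), ("1st Half".toList, "1° Tempo".toList), ("2nd Half".toList, "2° Tempo".toList), ("No".toList, "Não".toList)] : List (List Char × List Char)) ++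
        (("Yes".toList, "Sim".toList) ::
          (([("More".toList, "Mais de".toList), ("Odd".toList, "Impar".toList), ("Even".toList, "Par".toList)] : List (List Char × List Char)) ++ [("more".toList, "Mais de".toList)])) from rfl]
  rw [pv_foldA_append ([("Under".toList, "Abaixo".toList), ("Over".toList, "Acima".toList), ("Draw".toList, "Empate".toList), ("Away".toList, "Visitante".toList), ("Home".toList, "Casa".toList), ("1st Half".toList, "1° Tempo".toList), ("2nd Half".toList, "2° Tempo".toList), ("No".toList, "Não".toList)] : List (List Char × List Char)) _ ("Yes".toList ++ t),
    pv_foldA_append ([("Under".toList, "Abaixo".toList), ("Over".toList, "Acima".toList), ("Draw".toList, "Empate".toList), ("Away".toList, "Visitante".toList), ("Home".toList, "Casa".toList), ("1st Half".toList, "1° Tempo".toList), ("2nd Half".toList, "2° Tempo".toList), ("No".toList, "Não".toList)] : List (List Char × List Char)) _ t,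
    pv_shield_fold ([("Under".toList, "Abaixo".toList), ("Over".toList, "Acima".toList), ("Draw".toList, "Empate".toList), ("Away".toList, "Visitante".toList), ("Home".toList, "Casa".toList), ("1st Half".toList, "1° Tempo".toList), ("2nd Half".toList, "2° Tempo".toList), ("No".toList, "Não".toList)] : List (List Char × List Char)) ("Yes".toList) (by decide) t,
    pv_foldA_cons ("Yes".toList, "Sim".toList) _ ("Yes".toList ++ pvFoldA ([("Under".toList, "Abaixo".toList), ("Over".toList, "Acima".toList), ("Draw".toList, "Empate".toList), ("Away".toList, "Visitante".toList), ("Home".toList, "Casa".toList), ("1st Half".toList, "1° Tempo".toList), ("2nd Half".toList, "2° Tempo".toList), ("No".toList, "Não".toList)] : List (List Char × List Char)) t),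
    pv_foldA_cons ("Yes".toList, "Sim".toList) _ (pvFoldA ([("Under".toList, "Abaixo".toList), ("Over".toList, "Acima".toList), ("Draw".toList, "Empate".toList), ("Away".toList, "Visitante".toList), ("Home".toList, "Casa".toList), ("1st Half".toList, "1° Tempo".toList), ("2nd Half".toList, "2° Tempo".toList), ("No".toList, "Não".toList)] : List (List Char × List Char)) t),
    pv_replace_front ("Yes".toList) ("Sim".toList) _ (by decide) (List.prefix_append _ _),
    List.drop_left,
    pv_foldA_append ([("More".toList, "Mais de".toList), ("Odd".toList, "Impar".toList), ("Even".toList, "Par".toList)] : List (List Char × List Char)) [("more".toList, "Mais de".toList)]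
      ("Sim".toList ++ PySem.Chars.replace (pvFoldA ([("Under".toList, "Abaixo".toList), ("Over".toList, "Acima".toList), ("Draw".toList, "Empate".toList), ("Away".toList, "Visitante".toList), ("Home".toList, "Casa".toList), ("1st Half".toList, "1° Tempo".toList), ("2nd Half".toList, "2° Tempo".toList), ("No".toList, "Não".toList)] : List (List Char × List Char)) t) "Yes".toList "Sim".toList),
    pv_foldA_append ([("More".toList, "Mais de".toList), ("Odd".toList, "Impar".toList), ("Even".toList, "Par".toList)] : List (List Char × List Char)) [("more".toList, "Mais de".toList)]
      (PySem.Chars.replace (pvFoldA ([("Under".toList, "Abaixo".toList), ("Over".toList, "Acima".toList), ("Draw".toList, "Empate".toList), ("Away".toList, "Visitante".toList), ("Home".toList, "Casa".toList), ("1st Half".toList, "1° Tempo".toList), ("2nd Half".toList, "2° Tempo".toList), ("No".toList, "Não".toList)] : List (List Char × List Char)) t) "Yes".toList "Sim".toList),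
    pv_shield_fold ([("More".toList, "Mais de".toList), ("Odd".toList, "Impar".toList), ("Even".toList, "Par".toList)] : List (List Char × List Char)) ("Sim".toList) (by decide)
      (PySem.Chars.replace (pvFoldA ([("Under".toList, "Abaixo".toList), ("Over".toList, "Acima".toList), ("Draw".toList, "Empate".toList), ("Away".toList, "Visitante".toList), ("Home".toList, "Casa".toList), ("1st Half".toList, "1° Tempo".toList), ("2nd Half".toList, "2° Tempo".toList), ("No".toList, "Não".toList)] : List (List Char × List Char)) t) "Yes".toList "Sim".toList),
    pv_foldA_cons ("more".toList, "Mais de".toList) [] _,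
    pv_foldA_cons ("more".toList, "Mais de".toList) [] _,
    pv_foldA_nil, pv_foldA_nil]
  exact pv_more_step _ hY

theorem pvFindKey_none_spec :
    ∀ (L : List (List Char × List Char)) (s : List Char), pvFindKey L s = none →
      ∀ kv ∈ L, ¬ kv.1 <+: s := by
  intro L
  induction L with
  | nil => intro s _ kv hm; exact (List.not_mem_nil hm).elim
  | cons kv0 L' ih =>
    intro s hf kv hm
    rw [pvFindKey] at hf
    by_cases hp : PySem.Chars.startswith s kv0.1 = true
    · rw [if_pos hp] at hf; cases hf
    · rw [if_neg hp] at hf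
      rcases List.mem_cons.mp hm with rfl | hm'
      · exact fun hc => hp ((PySem.Chars.startswith_iff _ _).mpr hc)
      · exact ih s hf kv hm'

theorem pvFindKey_some_spec :
    ∀ (L : List (List Char × List Char)) (s : List Char) (kv : List Char × List Char),
      pvFindKey L s = some kv → kv ∈ L ∧ kv.1 <+: s := by
  intro L
  induction L with
  | nil => intro s kv hf; cases hf
  | cons kv0 L' ih =>
    intro s kv hf
    rw [pvFindKey] at hf
    by_cases hp : PySem.Chars.startswith s kv0.1 = true
    · rw [if_pos hp] at hf
      cases hf
      exact ⟨List.mem_cons_self, (PySem.Chars.startswith_iff _ _).mp hp⟩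
    · rw [if_neg hp] at hf
      obtain ⟨hm, hpre⟩ := ih s kv hf
      exact ⟨List.mem_cons_of_mem _ hm, hpre⟩

set_option maxRecDepth 4096 in
theorem pv_main : ∀ (fuel : Nat) (s : List Char), s.length ≤ fuel →
    PySem.Chars.isIn ('Y'::'e'::'s'::'o'::'r'::'e'::[]) s = false →
    pvFoldA pvTable s = pvScanGo fuel s := by
  intro fuel
  induction fuel with
  | zero =>
    intro s h1 _
    have hs : s = [] := by cases s with | nil => rfl | cons c t => simp at h1
    subst hs
    rw [pv_foldA_empty _ pv_tableKeysNe]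
    rfl
  | succ f ih =>
    intro s h1 hy
    cases hfind : pvFindKey pvTable s with
    | none =>
      cases s with
      | nil =>
        rw [pv_foldA_empty _ pv_tableKeysNe]
        simp [pvScanGo, hfind]
      | cons c t =>
        have h2 := pvFindKey_none_spec _ _ hfind
        have hyt : PySem.Chars.isIn ('Y'::'e'::'s'::'o'::'r'::'e'::[]) t = false := by
          rw [PySem.Chars.isIn_eq_false_iff] at hy ⊢
          exact fun hin => hy (List.infix_cons hin)
        rw [pv_cons_fold c pvTable pv_goodTable t h2, ih t (by simp at h1; omega) hyt]
        simp [pvScanGo, hfind]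
    | some kv =>
      obtain ⟨hmem, hpre⟩ := pvFindKey_some_spec _ _ _ hfind
      obtain ⟨t, rfl⟩ := hpre
      have hkne : kv.1 ≠ [] := pv_tableKeysNe kv hmem
      have hkpos : 1 ≤ kv.1.length := by
        cases hx : kv.1 with
        | nil => exact absurd hx hkne
        | cons a b => simp
      have hlen : t.length ≤ f := by
        rw [List.length_append] at h1
        omega
      have hyt : PySem.Chars.isIn ('Y'::'e'::'s'::'o'::'r'::'e'::[]) t = false := by
        rw [PySem.Chars.isIn_eq_false_iff] at hy ⊢
        intro hin
        apply hy
        obtain ⟨u, w2, huw⟩ := hin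
        exact ⟨kv.1 ++ u, w2, by rw [← huw]; simp⟩
      simp only [pvScanGo, hfind, List.drop_left]
      rw [← ih t hlen hyt]
      simp only [pvTable, List.mem_cons, List.not_mem_nil, or_false] at hmem
      rcases hmem with rfl|rfl|rfl|rfl|rfl|rfl|rfl|rfl|rfl|rfl|rfl|rfl|rfl
      · exact pv_keystep_Under t
      · exact pv_keystep_Over t
      · exact pv_keystep_Draw t
      · exact pv_keystep_Away t
      · exact pv_keystep_Home t
      · exact pv_keystep_FirstHalf t
      · exact pv_keystep_SecondHalf t
      · exact pv_keystep_No t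
      · -- key "Yes"
        have hore : ¬ (('o'::'r'::'e'::[]) <+: t) := by
          intro hp
          obtain ⟨r, rfl⟩ := hp
          rw [PySem.Chars.isIn_eq_false_iff] at hy
          exact hy ⟨[], r, by rfl⟩
        exact pv_keystep_Yes t hore
      · exact pv_keystep_More t
      · exact pv_keystep_Odd t
      · exact pv_keystep_Even t
      · exact pv_keystep_lowmore t

theorem pv_not_yesore_prefix (k t : List Char) (h1 : ¬ k <+: "Yes".toList)
    (h2 : ¬ ("Yes".toList : List Char) <+: k) :
    ¬ ('Y'::'e'::'s'::'o'::'r'::'e'::[]) <+: (k ++ t) := by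
  intro hp
  have hY : ("Yes".toList : List Char) <+: k ++ t := List.IsPrefix.trans (by decide) hp
  have hk : k <+: k ++ t := List.prefix_append _ _
  rcases Nat.le_total k.length ("Yes".toList : List Char).length with h | h
  · exact h1 (List.prefix_of_prefix_length_le hk hY h)
  · exact h2 (List.prefix_of_prefix_length_le hY hk h)

theorem pv_infix_tail (k t : List Char)
    (h : PySem.Chars.isIn ('Y'::'e'::'s'::'o'::'r'::'e'::[]) (k ++ t) = true)
    (hnp : ¬ ('Y'::'e'::'s'::'o'::'r'::'e'::[]) <+: (k ++ t))
    (hinc : ∀ i, i < k.length → 1 ≤ i →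
      ¬ ('Y'::'e'::'s'::'o'::'r'::'e'::[]) <+: List.drop i k ∧
      ¬ List.drop i k <+: ('Y'::'e'::'s'::'o'::'r'::'e'::[])) :
    PySem.Chars.isIn ('Y'::'e'::'s'::'o'::'r'::'e'::[]) t = true := by
  obtain ⟨j, hj⟩ := (PySem.Chars.exists_prefix_drop_iff_isIn _ _).mpr h
  rcases Nat.lt_or_ge j k.length with hlt | hge
  · rcases Nat.eq_zero_or_pos j with rfl | hpos
    · exact absurd hj hnp
    · rw [List.drop_append, Nat.sub_eq_zero_of_le (Nat.le_of_lt hlt), List.drop_zero] at hj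
      exact absurd hj
        (pv_not_prefix_append _ _ _ (hinc j hlt hpos).1 (hinc j hlt hpos).2)
  · rw [List.drop_append, List.drop_eq_nil_of_le hge, List.nil_append] at hj
    exact (PySem.Chars.exists_prefix_drop_iff_isIn _ _).mp ⟨j - k.length, hj⟩

theorem pv_casc_more (Z : List Char) :
    PySem.Chars.replace ("Sim".toList ++ (('o'::'r'::'e'::[]) ++ Z)) "more".toList "Mais de".toList
      = 'S'::'i'::("Mais de".toList ++ PySem.Chars.replace Z "more".toList "Mais de".toList) := by
  have h0 : ("Sim".toList ++ (('o'::'r'::'e'::[]) ++ Z) : List Char)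
      = 'S'::'i'::("more".toList ++ Z) := rfl
  rw [h0,
    pv_replace_cons _ _ _ _ (by decide)
      (by intro hp; exact absurd (List.cons_prefix_cons.mp hp).1 (by decide)),
    pv_replace_cons _ _ _ _ (by decide)
      (by intro hp; exact absurd (List.cons_prefix_cons.mp hp).1 (by decide)),
    pv_replace_front "more".toList "Mais de".toList _ (by decide) (List.prefix_append _ _),
    List.drop_left]

set_option maxRecDepth 4096 in
theorem pv_casc (r : List Char) :
    pvFoldA pvTable ("Yes".toList ++ (('o'::'r'::'e'::[]) ++ r)) =
      'S'::'i'::("Mais de".toList ++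
        PySem.Chars.replace
          (pvFoldA ([("More".toList, "Mais de".toList), ("Odd".toList, "Impar".toList), ("Even".toList, "Par".toList)] : List (List Char × List Char))
            (PySem.Chars.replace (pvFoldA ([("Under".toList, "Abaixo".toList), ("Over".toList, "Acima".toList), ("Draw".toList, "Empate".toList), ("Away".toList, "Visitante".toList), ("Home".toList, "Casa".toList), ("1st Half".toList, "1° Tempo".toList), ("2nd Half".toList, "2° Tempo".toList), ("No".toList, "Não".toList)] : List (List Char × List Char)) r)
              "Yes".toList "Sim".toList))
          "more".toList "Mais de".toList) := by
  rw [show pvTable =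
      ([("Under".toList, "Abaixo".toList), ("Over".toList, "Acima".toList), ("Draw".toList, "Empate".toList), ("Away".toList, "Visitante".toList), ("Home".toList, "Casa".toList), ("1st Half".toList, "1° Tempo".toList), ("2nd Half".toList, "2° Tempo".toList), ("No".toList, "Não".toList)] : List (List Char × List Char)) ++
        (("Yes".toList, "Sim".toList) ::
          (([("More".toList, "Mais de".toList), ("Odd".toList, "Impar".toList), ("Even".toList, "Par".toList)] : List (List Char × List Char)) ++ [("more".toList, "Mais de".toList)])) from rfl]
  rw [pv_foldA_append ([("Under".toList, "Abaixo".toList), ("Over".toList, "Acima".toList), ("Draw".toList, "Empate".toList), ("Away".toList, "Visitante".toList), ("Home".toList, "Casa".toList), ("1st Half".toList, "1° Tempo".toList), ("2nd Half".toList, "2° Tempo".toList), ("No".toList, "Não".toList)] : List (List Char × List Char)) _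
      ("Yes".toList ++ (('o'::'r'::'e'::[]) ++ r)),
    pv_shield_fold ([("Under".toList, "Abaixo".toList), ("Over".toList, "Acima".toList), ("Draw".toList, "Empate".toList), ("Away".toList, "Visitante".toList), ("Home".toList, "Casa".toList), ("1st Half".toList, "1° Tempo".toList), ("2nd Half".toList, "2° Tempo".toList), ("No".toList, "Não".toList)] : List (List Char × List Char)) ("Yes".toList) (by decide)
      (('o'::'r'::'e'::[]) ++ r),
    pv_shield_fold ([("Under".toList, "Abaixo".toList), ("Over".toList, "Acima".toList), ("Draw".toList, "Empate".toList), ("Away".toList, "Visitante".toList), ("Home".toList, "Casa".toList), ("1st Half".toList, "1° Tempo".toList), ("2nd Half".toList, "2° Tempo".toList), ("No".toList, "Não".toList)] : List (List Char × List Char)) ('o'::'r'::'e'::[]) (by decide) r,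
    pv_foldA_cons ("Yes".toList, "Sim".toList) _
      ("Yes".toList ++ (('o'::'r'::'e'::[]) ++ pvFoldA ([("Under".toList, "Abaixo".toList), ("Over".toList, "Acima".toList), ("Draw".toList, "Empate".toList), ("Away".toList, "Visitante".toList), ("Home".toList, "Casa".toList), ("1st Half".toList, "1° Tempo".toList), ("2nd Half".toList, "2° Tempo".toList), ("No".toList, "Não".toList)] : List (List Char × List Char)) r)),
    pv_replace_front ("Yes".toList) ("Sim".toList) _ pv_yesNe (List.prefix_append _ _),
    List.drop_left,
    pv_shield ("Yes".toList) ("Sim".toList) pv_yesNe ('o'::'r'::'e'::[])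
      (pvFoldA ([("Under".toList, "Abaixo".toList), ("Over".toList, "Acima".toList), ("Draw".toList, "Empate".toList), ("Away".toList, "Visitante".toList), ("Home".toList, "Casa".toList), ("1st Half".toList, "1° Tempo".toList), ("2nd Half".toList, "2° Tempo".toList), ("No".toList, "Não".toList)] : List (List Char × List Char)) r) (by decide),
    pv_foldA_append ([("More".toList, "Mais de".toList), ("Odd".toList, "Impar".toList), ("Even".toList, "Par".toList)] : List (List Char × List Char)) [("more".toList, "Mais de".toList)]
      ("Sim".toList ++ (('o'::'r'::'e'::[]) ++
        PySem.Chars.replace (pvFoldA ([("Under".toList, "Abaixo".toList), ("Over".toList, "Acima".toList), ("Draw".toList, "Empate".toList), ("Away".toList, "Visitante".toList), ("Home".toList, "Casa".toList), ("1st Half".toList, "1° Tempo".toList), ("2nd Half".toList, "2° Tempo".toList), ("No".toList, "Não".toList)] : List (List Char × List Char)) r) "Yes".toList "Sim".toList)),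
    pv_shield_fold ([("More".toList, "Mais de".toList), ("Odd".toList, "Impar".toList), ("Even".toList, "Par".toList)] : List (List Char × List Char)) ("Sim".toList) (by decide)
      (('o'::'r'::'e'::[]) ++
        PySem.Chars.replace (pvFoldA ([("Under".toList, "Abaixo".toList), ("Over".toList, "Acima".toList), ("Draw".toList, "Empate".toList), ("Away".toList, "Visitante".toList), ("Home".toList, "Casa".toList), ("1st Half".toList, "1° Tempo".toList), ("2nd Half".toList, "2° Tempo".toList), ("No".toList, "Não".toList)] : List (List Char × List Char)) r) "Yes".toList "Sim".toList),
    pv_shield_fold ([("More".toList, "Mais de".toList), ("Odd".toList, "Impar".toList), ("Even".toList, "Par".toList)] : List (List Char × List Char)) ('o'::'r'::'e'::[]) (by decide)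
      (PySem.Chars.replace (pvFoldA ([("Under".toList, "Abaixo".toList), ("Over".toList, "Acima".toList), ("Draw".toList, "Empate".toList), ("Away".toList, "Visitante".toList), ("Home".toList, "Casa".toList), ("1st Half".toList, "1° Tempo".toList), ("2nd Half".toList, "2° Tempo".toList), ("No".toList, "Não".toList)] : List (List Char × List Char)) r) "Yes".toList "Sim".toList),
    pv_foldA_cons ("more".toList, "Mais de".toList) [] _,
    pv_foldA_nil]
  exact pv_casc_more _

set_option maxRecDepth 4096 in
theorem pv_main_ne : ∀ (fuel : Nat) (s : List Char), s.length ≤ fuel →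
    PySem.Chars.isIn ('Y'::'e'::'s'::'o'::'r'::'e'::[]) s = true →
    pvFoldA pvTable s ≠ pvScanGo fuel s := by
  intro fuel
  induction fuel with
  | zero =>
    intro s h1 hy
    have hs : s = [] := by cases s with | nil => rfl | cons c t => simp at h1
    subst hs
    exact absurd hy (by decide)
  | succ f ih =>
    intro s h1 hy
    cases hfind : pvFindKey pvTable s with
    | none =>
      cases s with
      | nil => exact absurd hy (by decide)
      | cons c t =>
        have h2 := pvFindKey_none_spec _ _ hfind
        have hyt : PySem.Chars.isIn ('Y'::'e'::'s'::'o'::'r'::'e'::[]) t = true := by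
          obtain ⟨j, hj⟩ := (PySem.Chars.exists_prefix_drop_iff_isIn _ _).mpr hy
          cases j with
          | zero =>
            exact absurd (List.IsPrefix.trans (by decide) hj)
              (h2 ("Yes".toList, "Sim".toList) (by simp [pvTable]))
          | succ j' =>
            exact (PySem.Chars.exists_prefix_drop_iff_isIn _ _).mp ⟨j', hj⟩
        rw [pv_cons_fold c pvTable pv_goodTable t h2]
        simp only [pvScanGo, hfind]
        intro he
        injection he with h3 h4
        exact ih t (by simp at h1; omega) hyt h4
    | some kv =>
      obtain ⟨hmem, hpre⟩ := pvFindKey_some_spec _ _ _ hfind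
      obtain ⟨t, rfl⟩ := hpre
      have hkne : kv.1 ≠ [] := pv_tableKeysNe kv hmem
      have hkpos : 1 ≤ kv.1.length := by
        cases hx : kv.1 with
        | nil => exact absurd hx hkne
        | cons a b => simp
      have hlen : t.length ≤ f := by
        rw [List.length_append] at h1
        omega
      simp only [pvScanGo, hfind, List.drop_left]
      simp only [pvTable, List.mem_cons, List.not_mem_nil, or_false] at hmem
      rcases hmem with rfl|rfl|rfl|rfl|rfl|rfl|rfl|rfl|rfl|rfl|rfl|rfl|rfl
      · -- key "Under"
        have hnp : ¬ ('Y'::'e'::'s'::'o'::'r'::'e'::[]) <+: ("Under".toList ++ t) :=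
          pv_not_yesore_prefix "Under".toList t (by decide) (by decide)
        have hyt := pv_infix_tail "Under".toList t hy hnp (by decide)
        rw [pv_keystep_Under t]
        intro he
        exact ih t hlen hyt (List.append_cancel_left he)
      · -- key "Over"
        have hnp : ¬ ('Y'::'e'::'s'::'o'::'r'::'e'::[]) <+: ("Over".toList ++ t) :=
          pv_not_yesore_prefix "Over".toList t (by decide) (by decide)
        have hyt := pv_infix_tail "Over".toList t hy hnp (by decide)
        rw [pv_keystep_Over t]
        intro he
        exact ih t hlen hyt (List.append_cancel_left he)
      · -- key "Draw"
        have hnp : ¬ ('Y'::'e'::'s'::'o'::'r'::'e'::[]) <+: ("Draw".toList ++ t) :=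
          pv_not_yesore_prefix "Draw".toList t (by decide) (by decide)
        have hyt := pv_infix_tail "Draw".toList t hy hnp (by decide)
        rw [pv_keystep_Draw t]
        intro he
        exact ih t hlen hyt (List.append_cancel_left he)
      · -- key "Away"
        have hnp : ¬ ('Y'::'e'::'s'::'o'::'r'::'e'::[]) <+: ("Away".toList ++ t) :=
          pv_not_yesore_prefix "Away".toList t (by decide) (by decide)
        have hyt := pv_infix_tail "Away".toList t hy hnp (by decide)
        rw [pv_keystep_Away t]
        intro he
        exact ih t hlen hyt (List.append_cancel_left he)
      · -- key "Home"
        have hnp : ¬ ('Y'::'e'::'s'::'o'::'r'::'e'::[]) <+: ("Home".toList ++ t) :=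
          pv_not_yesore_prefix "Home".toList t (by decide) (by decide)
        have hyt := pv_infix_tail "Home".toList t hy hnp (by decide)
        rw [pv_keystep_Home t]
        intro he
        exact ih t hlen hyt (List.append_cancel_left he)
      · -- key "1st Half"
        have hnp : ¬ ('Y'::'e'::'s'::'o'::'r'::'e'::[]) <+: ("1st Half".toList ++ t) :=
          pv_not_yesore_prefix "1st Half".toList t (by decide) (by decide)
        have hyt := pv_infix_tail "1st Half".toList t hy hnp (by decide)
        rw [pv_keystep_FirstHalf t]
        intro he
        exact ih t hlen hyt (List.append_cancel_left he)
      · -- key "2nd Half"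
        have hnp : ¬ ('Y'::'e'::'s'::'o'::'r'::'e'::[]) <+: ("2nd Half".toList ++ t) :=
          pv_not_yesore_prefix "2nd Half".toList t (by decide) (by decide)
        have hyt := pv_infix_tail "2nd Half".toList t hy hnp (by decide)
        rw [pv_keystep_SecondHalf t]
        intro he
        exact ih t hlen hyt (List.append_cancel_left he)
      · -- key "No"
        have hnp : ¬ ('Y'::'e'::'s'::'o'::'r'::'e'::[]) <+: ("No".toList ++ t) :=
          pv_not_yesore_prefix "No".toList t (by decide) (by decide)
        have hyt := pv_infix_tail "No".toList t hy hnp (by decide)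
        rw [pv_keystep_No t]
        intro he
        exact ih t hlen hyt (List.append_cancel_left he)
      · -- key "Yes"
        by_cases hore : (('o'::'r'::'e'::[]) : List Char) <+: t
        · obtain ⟨r, rfl⟩ := hore
          intro he
          rw [pv_casc r] at he
          have h3 : (some 'M' : Option Char) = some 'm' := congrArg (fun l => l[2]?) he
          exact absurd h3 (by decide)
        · have hnp : ¬ ('Y'::'e'::'s'::'o'::'r'::'e'::[]) <+: ("Yes".toList ++ t) := by
            intro hp
            obtain ⟨w, hw⟩ := hp
            apply hore
            have hw2 : ("Yes".toList ++ ('o'::'r'::'e'::[])) ++ w = "Yes".toList ++ t := hw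
            rw [List.append_assoc] at hw2
            exact ⟨w, List.append_cancel_left hw2⟩
          have hyt := pv_infix_tail "Yes".toList t hy hnp (by decide)
          rw [pv_keystep_Yes t hore]
          intro he
          exact ih t hlen hyt (List.append_cancel_left he)
      · -- key "More"
        have hnp : ¬ ('Y'::'e'::'s'::'o'::'r'::'e'::[]) <+: ("More".toList ++ t) :=
          pv_not_yesore_prefix "More".toList t (by decide) (by decide)
        have hyt := pv_infix_tail "More".toList t hy hnp (by decide)
        rw [pv_keystep_More t]
        intro he
        exact ih t hlen hyt (List.append_cancel_left he)
      · -- key "Odd"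
        have hnp : ¬ ('Y'::'e'::'s'::'o'::'r'::'e'::[]) <+: ("Odd".toList ++ t) :=
          pv_not_yesore_prefix "Odd".toList t (by decide) (by decide)
        have hyt := pv_infix_tail "Odd".toList t hy hnp (by decide)
        rw [pv_keystep_Odd t]
        intro he
        exact ih t hlen hyt (List.append_cancel_left he)
      · -- key "Even"
        have hnp : ¬ ('Y'::'e'::'s'::'o'::'r'::'e'::[]) <+: ("Even".toList ++ t) :=
          pv_not_yesore_prefix "Even".toList t (by decide) (by decide)
        have hyt := pv_infix_tail "Even".toList t hy hnp (by decide)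
        rw [pv_keystep_Even t]
        intro he
        exact ih t hlen hyt (List.append_cancel_left he)
      · -- key "more"
        have hnp : ¬ ('Y'::'e'::'s'::'o'::'r'::'e'::[]) <+: ("more".toList ++ t) :=
          pv_not_yesore_prefix "more".toList t (by decide) (by decide)
        have hyt := pv_infix_tail "more".toList t hy hnp (by decide)
        rw [pv_keystep_lowmore t]
        intro he
        exact ih t hlen hyt (List.append_cancel_left he)

theorem pv_stepStr (k v s : String) (hk : k.toList ≠ []) :
    (if PySem.Str.isIn k s then PySem.Str.replace s k v else s).toList
      = PySem.Chars.replace s.toList k.toList v.toList := by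
  by_cases h : PySem.Str.isIn k s
  · rw [if_pos h, PySem.Str.toList_replace]
  · rw [if_neg h]
    have hfalse : PySem.Chars.isIn k.toList s.toList = false := by
      rw [← PySem.Str.isIn_eq]
      simpa using h
    symm
    apply pv_replace_eq_self _ _ hk
    intro j hpf
    have : PySem.Chars.isIn k.toList s.toList = true :=
      (PySem.Chars.exists_prefix_drop_iff_isIn _ _).mp ⟨j, hpf⟩
    rw [hfalse] at this
    cases this

set_option maxRecDepth 4096 in
theorem pv_portA_gen (ks : List String) (hks : ∀ k ∈ ks, k.toList ≠ ([] : List Char)) :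
    ∀ s : String,
      (ks.foldl
        (fun s key_cotation =>
          if PySem.Str.isIn key_cotation s then
            PySem.Str.replace s key_cotation ((PySem.Dict.mk pvItems).getD key_cotation "")
          else s) s).toList
      = pvFoldA (ks.map (fun k => (k.toList, ((PySem.Dict.mk pvItems).getD k "").toList))) s.toList := by
  induction ks with
  | nil => intro s; rfl
  | cons k ks ih =>
    intro s
    rw [List.foldl_cons, List.map_cons, pv_foldA_cons,
      ← pv_stepStr k ((PySem.Dict.mk pvItems).getD k "") s (hks k List.mem_cons_self)]
    exact ih (fun k' h => hks k' (List.mem_cons_of_mem _ h)) _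

theorem pv_portA (s : String) : (renaming_cotations s).toList = pvFoldA pvTable s.toList := by
  have hkeys : (PySem.Dict.mk pvItems).keys = ["Under", "Over", "Draw", "Away", "Home", "1st Half", "2nd Half", "No", "Yes", "More", "Odd", "Even", "more"] := by
    simp [pvItems]
  rw [renaming_cotations, hkeys, pv_portA_gen _ (by decide) s]
  congr 1

theorem pv_portB (s : String) :
    (renaming_cotations_alt s).toList = pvScanGo s.toList.length s.toList := by
  rw [renaming_cotations_alt, String.toList_ofList]

-- ===== VERDICT (by name: the statement is the Claim_ definition above) =====
theorem renaming_cotations_spec : Claim_unchanged_renaming_cotations := by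
  intro s _
  unfold Spec_renaming_cotations
  intro hnd
  unfold D_renaming_cotations at hnd
  have hfalse : PySem.Str.isIn "Yesore" s = false := by simpa using hnd
  apply String.toList_inj.mp
  rw [pv_portA, pv_portB]
  apply pv_main s.toList.length s.toList le_rfl
  rw [show ('Y'::'e'::'s'::'o'::'r'::'e'::[]) = "Yesore".toList from rfl, ← PySem.Str.isIn_eq]
  exact hfalse

set_option maxRecDepth 8192 in
set_option maxHeartbeats 1000000 in
theorem renaming_cotations_changed : Claim_changed_renaming_cotations := by
  unfold Claim_changed_renaming_cotations
  refine ⟨by decide, by decide, ?_, ?_, by decide⟩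
  · apply String.toList_inj.mp
    rw [pv_portA]
    decide
  · apply String.toList_inj.mp
    rw [pv_portB]
    decide

theorem renaming_cotations_tight : Claim_exact_renaming_cotations := by
  intro s _ hd
  unfold D_renaming_cotations at hd
  intro he
  have htl := congrArg String.toList he
  rw [pv_portA, pv_portB] at htl
  exact pv_main_ne s.toList.length s.toList le_rfl
    (by
      rw [show ('Y'::'e'::'s'::'o'::'r'::'e'::[]) = ("Yesore".toList : List Char) from rfl,
        ← PySem.Str.isIn_eq]
      exact hd) htl
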